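-- pv_equiv track=rewrite | github.com/qazwsxedc121/lex_mint | src/api/services/context_planner.py | _truncate_messages_by_rounds
-- ===== SOURCE A (Python) =====
-- from typing import Any, Dict, List, Optional, Sequence
--
-- def _truncate_messages_by_rounds(messages: List[Dict[str, Any]], max_rounds: Optional[int]) -> List[Dict[str, Any]]:
--     if not max_rounds or max_rounds <= 0:
--         return list(messages)
--
--     human_indexes = [
--         index for index, msg in enumerate(messages)
--         if msg.get("role") == "user"
--     ]
--     if len(human_indexes) <= max_rounds:
--         return list(messages)
--
--     start_index = human_indexes[-max_rounds]
--     return list(messages[start_index:])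
-- ===== SOURCE B (Python) =====
-- from typing import Any, Dict, List, Optional
--
-- def _truncate_messages_by_rounds(messages: List[Dict[str, Any]], max_rounds: Optional[int]) -> List[Dict[str, Any]]:
--     if not max_rounds or max_rounds <= 0:
--         return list(messages)
--     seen = 0
--     start = 0
--     for i, msg in reversed(list(enumerate(messages))):
--         if msg.get("role") == "user":
--             seen += 1
--             if seen == max_rounds:
--                 start = i
--             elif seen > max_rounds:
--                 return list(messages[start:])
--     return list(messages)
-- ===== Notes on version B (the rewrite author's own statement) =====
-- stated objective: alternative
-- what changed: Instead of materialising the full list of user-message indexes and indexing it from the end, B scans the messages once from the back with a counter, remembering the index where the counter reaches max_rounds and returning the tail as soon as a further earlier user message proves truncation is needed.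
import Mathlib
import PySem

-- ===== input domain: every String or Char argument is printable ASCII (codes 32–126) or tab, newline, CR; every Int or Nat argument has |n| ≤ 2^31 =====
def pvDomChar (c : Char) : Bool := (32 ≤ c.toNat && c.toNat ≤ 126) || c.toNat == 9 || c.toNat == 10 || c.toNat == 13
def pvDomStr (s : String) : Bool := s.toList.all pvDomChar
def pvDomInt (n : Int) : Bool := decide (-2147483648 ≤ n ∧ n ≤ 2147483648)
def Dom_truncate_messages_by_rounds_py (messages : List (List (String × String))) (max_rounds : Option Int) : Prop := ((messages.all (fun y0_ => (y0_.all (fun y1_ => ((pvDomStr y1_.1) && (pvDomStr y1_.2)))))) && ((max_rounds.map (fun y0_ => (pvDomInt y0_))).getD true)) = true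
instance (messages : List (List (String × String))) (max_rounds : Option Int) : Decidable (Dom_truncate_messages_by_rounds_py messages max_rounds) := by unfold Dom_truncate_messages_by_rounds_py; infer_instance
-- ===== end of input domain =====

-- B replaces A's "collect all user-message indexes, then index from the end" by a single
-- backwards scan with a counter and an early return (objective: alternative decomposition).

-- shared one-line accessor: msg.get("role")
def pvRole? (msg : List (String × String)) : Option String :=
  PySem.Dict.get? (PySem.Dict.mk msg) "role"

-- ===== PORT A =====
def truncate_messages_by_rounds_py (messages : List (List (String × String))) (max_rounds : Option Int) : List (List (String × String)) :=
  match max_rounds with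
  | none => messages
  | some mr =>
    if mr ≤ 0 then messages
    else
      let human_indexes := ((PySem.List.enumerate messages 0).filter
        (fun p => pvRole? p.2 == some "user")).map (·.1)
      if (human_indexes.length : Int) ≤ mr then messages
      else
        -- human_indexes[-max_rounds]; in range since max_rounds < len(human_indexes)
        PySem.List.slice messages (some (PySem.List.pyGetD human_indexes (-mr) 0)) none

-- ===== PORT B =====
-- the reversed-enumerate loop of Source B; state (seen, start)
def pvScanB (messages : List (List (String × String))) (mr : Int) :
    List (Int × List (String × String)) → Int → Int → List (List (String × String))
  | [], _, _ => messages
  | (i, msg) :: rest, seen, start =>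
    if pvRole? msg == some "user" then
      if seen + 1 = mr then pvScanB messages mr rest (seen + 1) i
      else if mr < seen + 1 then PySem.List.slice messages (some start) none
      else pvScanB messages mr rest (seen + 1) start
    else pvScanB messages mr rest seen start

def truncate_messages_by_rounds_py_alt (messages : List (List (String × String))) (max_rounds : Option Int) : List (List (String × String)) :=
  match max_rounds with
  | none => messages
  | some mr =>
    if mr ≤ 0 then messages
    else pvScanB messages mr (PySem.List.enumerate messages 0).reverse 0 0

-- ===== PRECONDITION & SPEC =====
def Spec_truncate_messages_by_rounds_py (messages : List (List (String × String))) (max_rounds : Option Int) (out : List (List (String × String))) : Prop := out = truncate_messages_by_rounds_py_alt messages max_rounds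
instance (messages : List (List (String × String))) (max_rounds : Option Int) (out : List (List (String × String))) : Decidable (Spec_truncate_messages_by_rounds_py messages max_rounds out) := by unfold Spec_truncate_messages_by_rounds_py; infer_instance

-- ===== CLAIM (what is proved, stated in full; the proofs are below) =====
def Claim_equal_truncate_messages_by_rounds_py : Prop := ∀ (messages : List (List (String × String))) (max_rounds : Option Int), Dom_truncate_messages_by_rounds_py messages max_rounds → Spec_truncate_messages_by_rounds_py messages max_rounds (truncate_messages_by_rounds_py messages max_rounds)

-- ===== LEMMAS AND PROOFS =====

-- the user-index list of a chunk of the enumeration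
def pvH (l : List (Int × List (String × String))) : List Int :=
  (l.filter (fun p => pvRole? p.2 == some "user")).map (·.1)

lemma pvScanB_correct (messages : List (List (String × String))) (mr : Int)
    (_hmr : 0 < mr) (l1 : List (Int × List (String × String))) :
    ∀ (l2 : List (Int × List (String × String))) (seen start : Int),
    seen = ((pvH l2).length : Int) →
    seen ≤ mr →
    (seen = mr → (pvH l2).head? = some start) →
    pvScanB messages mr l1.reverse seen start =
      (if (((pvH (l1 ++ l2)).length : Int) ≤ mr) then messages
       else PySem.List.slice messages (some (PySem.List.pyGetD (pvH (l1 ++ l2)) (-mr) 0)) none) := by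
  induction l1 using List.reverseRecOn with
  | nil =>
    intro l2 seen start hseen hle _
    simp only [List.reverse_nil, pvScanB, List.nil_append]
    rw [if_pos (by omega)]
  | append_singleton xs x ih =>
    intro l2 seen start hseen hle hstart
    obtain ⟨i, msg⟩ := x
    rw [List.reverse_append, List.reverse_singleton, List.singleton_append]
    have hre : xs ++ [(i, msg)] ++ l2 = xs ++ ((i, msg) :: l2) := by
      simp [List.append_assoc]
    rw [hre]
    cases hu : (pvRole? msg == some "user") with
    | false =>
      have hH : pvH ((i, msg) :: l2) = pvH l2 := by
        simp [pvH, hu]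
      rw [pvScanB, if_neg (by simp [hu])]
      rw [ih ((i, msg) :: l2) seen start (by rw [hH]; exact hseen) hle
        (by rw [hH]; exact hstart)]
    | true =>
      have hH : pvH ((i, msg) :: l2) = i :: pvH l2 := by
        simp [pvH, hu]
      rw [pvScanB, if_pos (by simp [hu])]
      by_cases h1 : seen + 1 = mr
      · rw [if_pos h1]
        rw [ih ((i, msg) :: l2) (seen + 1) i
          (by rw [hH]; simp; omega) (by omega) (by rw [hH]; simp)]
      · rw [if_neg h1]
        by_cases h2 : mr < seen + 1
        · -- seen = mr already: truncation point found, early return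
          rw [if_pos h2]
          have hseq : seen = mr := by omega
          obtain ⟨t, ht⟩ : ∃ t, pvH l2 = start :: t := by
            cases hh : pvH l2 with
            | nil => simp [hh] at hstart; exact absurd (hstart hseq) (by simp)
            | cons a t =>
              have := hstart hseq
              rw [hh] at this; simp at this
              exact ⟨t, by rw [this]⟩
          have hlen2 : ((pvH l2).length : Int) = mr := by omega
          have hsplit : pvH (xs ++ ((i, msg) :: l2)) = (pvH xs ++ [i]) ++ pvH l2 := by
            simp [pvH, List.filter_append, hu]
          have hlenH : (pvH l2).length ≤ (pvH (xs ++ ((i, msg) :: l2))).length := by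
            rw [hsplit]; simp; omega
          have hgt : ¬ (((pvH (xs ++ ((i, msg) :: l2))).length : Int) ≤ mr) := by
            rw [hsplit]; simp; omega
          rw [if_neg hgt]
          have hmrn : mr = (((pvH l2).length : Nat) : Int) := by omega
          rw [hmrn, PySem.List.pyGetD_neg_natCast _ _ _ (by simp [ht]) hlenH]
          congr 1
          have hk : (pvH (xs ++ ((i, msg) :: l2)))[(pvH (xs ++ ((i, msg) :: l2))).length
              - (pvH l2).length]? = some start := by
            rw [hsplit, ht]
            have hidx : (pvH xs ++ [i] ++ (start :: t)).length - (start :: t).length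
                = (pvH xs ++ [i]).length := by simp; omega
            rw [hidx, List.getElem?_append_right le_rfl]
            simp
          have hlt : (pvH (xs ++ ((i, msg) :: l2))).length - (pvH l2).length
              < (pvH (xs ++ ((i, msg) :: l2))).length := by
            rw [hsplit]; simp [ht]
          exact (hk.symm.trans (List.getElem?_eq_getElem hlt))
        · rw [if_neg h2]
          rw [ih ((i, msg) :: l2) (seen + 1) start
            (by rw [hH]; simp; omega) (by omega) (by intro hc; omega)]

-- ===== VERDICT (by name: the statement is the Claim_ definition above) =====
theorem truncate_messages_by_rounds_py_spec : Claim_equal_truncate_messages_by_rounds_py := by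
  intro messages max_rounds _
  unfold Spec_truncate_messages_by_rounds_py
  cases max_rounds with
  | none => rfl
  | some mr =>
    by_cases hmr : mr ≤ 0
    · simp [truncate_messages_by_rounds_py, truncate_messages_by_rounds_py_alt, hmr]
    · have h := pvScanB_correct messages mr (by omega) (PySem.List.enumerate messages 0)
        [] 0 0 (by simp [pvH]) (by omega) (by intro h; omega)
      rw [List.append_nil] at h
      simp only [pvH] at h
      simp only [truncate_messages_by_rounds_py, truncate_messages_by_rounds_py_alt, hmr,
        if_false]
      exact h.symm
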